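-- pv_equiv track=rewrite | github.com/Tolaj/adaptive-user-response-assistant | transcription/hallucination/repetition.py | has_repetition
-- ===== SOURCE A (Python) =====
-- REPETITION_MIN_WORDS = 4
--
-- REPETITION_COUNT_THRESHOLD = 3
--
-- def has_repetition(text: str) -> bool:
--     """True if the same N-word phrase repeats 3+ times (Whisper looping)."""
--     words = text.lower().split()
--     n = REPETITION_MIN_WORDS
--     if len(words) < n * REPETITION_COUNT_THRESHOLD:
--         return False
--     for start in range(len(words) - n + 1):
--         phrase = tuple(words[start : start + n])
--         count, pos = 0, start
--         while pos <= len(words) - n: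
--             if tuple(words[pos : pos + n]) == phrase:
--                 count += 1
--                 pos += n
--             else:
--                 pos += 1
--         if count >= REPETITION_COUNT_THRESHOLD:
--             return True
--     return False
-- ===== SOURCE B (Python) =====
-- REPETITION_MIN_WORDS = 4
--
-- REPETITION_COUNT_THRESHOLD = 3
--
-- def has_repetition(text: str) -> bool:
--     """True if the same N-word phrase repeats 3+ times (Whisper looping)."""
--     words = text.lower().split()
--     n = REPETITION_MIN_WORDS
--     if len(words) < n * REPETITION_COUNT_THRESHOLD:
--         return False
--     counts = {}
--     next_free = {}
--     for i in range(len(words) - n + 1):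
--         p = tuple(words[i : i + n])
--         if next_free.get(p, 0) <= i:
--             c = counts.get(p, 0) + 1
--             if c >= REPETITION_COUNT_THRESHOLD:
--                 return True
--             counts[p] = c
--             next_free[p] = i + n
--     return False
-- ===== Notes on version B (the rewrite author's own statement) =====
-- stated objective: faster
-- what changed: Replaces the per-start O(W) greedy rescans with a single left-to-right pass that keeps, per 4-word phrase in a dict, its greedy non-overlapping match count and the next non-overlapping position, returning True when any count reaches 3.
import Mathlib
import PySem

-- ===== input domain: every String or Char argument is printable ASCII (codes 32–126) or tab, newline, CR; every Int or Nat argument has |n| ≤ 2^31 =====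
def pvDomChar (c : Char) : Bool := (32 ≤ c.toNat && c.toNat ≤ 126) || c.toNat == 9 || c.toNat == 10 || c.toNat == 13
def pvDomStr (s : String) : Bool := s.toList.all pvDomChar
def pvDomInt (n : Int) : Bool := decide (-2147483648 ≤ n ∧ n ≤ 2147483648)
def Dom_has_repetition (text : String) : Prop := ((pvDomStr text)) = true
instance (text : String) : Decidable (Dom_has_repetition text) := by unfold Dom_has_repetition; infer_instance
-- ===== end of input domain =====

-- B replaces A's per-start greedy rescans with one pass keeping per-phrase greedy state in dicts (faster).

-- shared helper: tuple(words[i : i + 4]) for a Nat index i; exact by PySem.List.slice_natCast_add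
def pvPhrase (ws : List String) (i : Nat) : List String := (ws.drop i).take 4

-- ===== PORT A =====
-- inner while loop: state (count, pos); 'pos <= len(words) - n' written as 'pos + 4 ≤ ws.length'
-- (identical for every ws this code reaches: the loops run only when 12 ≤ ws.length)
def pvInnerA (ws : List String) (p : List String) (count pos : Nat) : Nat :=
  if pos + 4 ≤ ws.length then
    if pvPhrase ws pos = p then pvInnerA ws p (count + 1) (pos + 4)
    else pvInnerA ws p count (pos + 1)
  else count
termination_by ws.length - pos

-- outer for loop over start in range(len(words) - 4 + 1), with early return True
def pvOuterA (ws : List String) (start : Nat) : Bool :=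
  if start + 4 ≤ ws.length then
    if 3 ≤ pvInnerA ws (pvPhrase ws start) 0 start then true
    else pvOuterA ws (start + 1)
  else false
termination_by ws.length - start

def has_repetition (text : String) : Bool :=
  let words := PySem.Str.split₀ (PySem.Str.lower text)
  if words.length < 4 * 3 then false
  else pvOuterA words 0

-- ===== PORT B =====
-- one pass; counts / next_free are Python dicts keyed by the 4-word phrase
def pvLoopB (ws : List String) (counts nextFree : PySem.Dict (List String) Nat) (i : Nat) : Bool :=
  if i + 4 ≤ ws.length then
    let p := pvPhrase ws i
    if nextFree.getD p 0 ≤ i then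
      let c := counts.getD p 0 + 1
      if 3 ≤ c then true
      else pvLoopB ws (counts.insert p c) (nextFree.insert p (i + 4)) (i + 1)
    else pvLoopB ws counts nextFree (i + 1)
  else false
termination_by ws.length - i

def has_repetition_alt (text : String) : Bool :=
  let words := PySem.Str.split₀ (PySem.Str.lower text)
  if words.length < 4 * 3 then false
  else pvLoopB words PySem.Dict.empty PySem.Dict.empty 0

-- ===== PRECONDITION & SPEC =====
def Spec_has_repetition (text : String) (out : Bool) : Prop := out = has_repetition_alt text
instance (text : String) (out : Bool) : Decidable (Spec_has_repetition text out) := by unfold Spec_has_repetition; infer_instance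

-- ===== CLAIM (what is proved, stated in full; the proofs are below) =====
def Claim_equal_has_repetition : Prop := ∀ (text : String), Dom_has_repetition text → Spec_has_repetition text (has_repetition text)

-- ===== LEMMAS AND PROOFS =====

-- greedy non-overlapping count of phrase p from position pos (A's inner loop without the accumulator)
def pvGC (ws p : List String) (pos : Nat) : Nat :=
  if pos + 4 ≤ ws.length then
    if pvPhrase ws pos = p then pvGC ws p (pos + 4) + 1
    else pvGC ws p (pos + 1)
  else 0
termination_by ws.length - pos

-- B's per-phrase state after processing positions < i: (greedy count so far, next non-overlapping position)
def pvGS (ws p : List String) : Nat → Nat × Nat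
  | 0 => (0, 0)
  | i + 1 =>
    if i + 4 ≤ ws.length ∧ pvPhrase ws i = p ∧ (pvGS ws p i).2 ≤ i then ((pvGS ws p i).1 + 1, i + 4)
    else pvGS ws p i

theorem pvInnerA_eq_gc (ws p : List String) (count pos : Nat) :
    pvInnerA ws p count pos = count + pvGC ws p pos := by
  fun_induction pvInnerA ws p count pos with
  | case1 count pos h hm ih => rw [pvGC]; simp [h, hm, ih]; omega
  | case2 count pos h hm ih => rw [pvGC]; simp [h, hm, ih]
  | case3 count pos h => rw [pvGC]; simp [h]

-- forward characterizations: gc ≥ t yields t pairwise non-overlapping occurrences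
theorem pvGC_one_to (ws p : List String) (pos : Nat) : 1 ≤ pvGC ws p pos →
    ∃ i, pos ≤ i ∧ i + 4 ≤ ws.length ∧ pvPhrase ws i = p := by
  fun_induction pvGC ws p pos with
  | case1 pos hl hm ih => exact fun _ => ⟨pos, le_refl _, hl, hm⟩
  | case2 pos hl hm ih =>
    intro h
    obtain ⟨i, hi, h4, hp⟩ := ih h
    exact ⟨i, by omega, h4, hp⟩
  | case3 pos hl => intro h; omega

theorem pvGC_two_to (ws p : List String) (pos : Nat) : 2 ≤ pvGC ws p pos →
    ∃ i j, pos ≤ i ∧ i + 4 ≤ j ∧ j + 4 ≤ ws.length ∧ pvPhrase ws i = p ∧ pvPhrase ws j = p := by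
  fun_induction pvGC ws p pos with
  | case1 pos hl hm ih =>
    intro h
    obtain ⟨j, hj, h4, hp⟩ := pvGC_one_to ws p (pos + 4) (by omega)
    exact ⟨pos, j, le_refl _, hj, h4, hm, hp⟩
  | case2 pos hl hm ih =>
    intro h
    obtain ⟨i, j, hi, hij, h4, hp, hq⟩ := ih h
    exact ⟨i, j, by omega, hij, h4, hp, hq⟩
  | case3 pos hl => intro h; omega

theorem pvGC_three_to (ws p : List String) (pos : Nat) : 3 ≤ pvGC ws p pos →
    ∃ i j k, pos ≤ i ∧ i + 4 ≤ j ∧ j + 4 ≤ k ∧ k + 4 ≤ ws.length ∧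
      pvPhrase ws i = p ∧ pvPhrase ws j = p ∧ pvPhrase ws k = p := by
  fun_induction pvGC ws p pos with
  | case1 pos hl hm ih =>
    intro h
    obtain ⟨j, k, hj, hjk, h4, hp, hq⟩ := pvGC_two_to ws p (pos + 4) (by omega)
    exact ⟨pos, j, k, le_refl _, hj, hjk, h4, hm, hp, hq⟩
  | case2 pos hl hm ih =>
    intro h
    obtain ⟨i, j, k, hi, hij, hjk, h4, hp, hq, hr⟩ := ih h
    exact ⟨i, j, k, by omega, hij, hjk, h4, hp, hq, hr⟩
  | case3 pos hl => intro h; omega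

-- backward characterizations: occurrences with gaps ≥ 4 force the greedy count up, from any pos ≤ the first one
theorem pvGC_one_of (ws p : List String) :
    ∀ d pos i, i - pos ≤ d → pos ≤ i → i + 4 ≤ ws.length → pvPhrase ws i = p →
      1 ≤ pvGC ws p pos := by
  intro d
  induction d with
  | zero =>
    intro pos i hd hpi h4 hp
    have : pos = i := by omega
    subst this
    rw [pvGC]; simp [h4, hp]
  | succ d ih =>
    intro pos i hd hpi h4 hp
    rw [pvGC]
    have hl : pos + 4 ≤ ws.length := by omega
    by_cases hm : pvPhrase ws pos = p
    · simp [hl, hm]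
    · have hne : pos ≠ i := fun h => hm (h ▸ hp)
      simp only [hl, if_true, hm, if_false]
      exact ih (pos + 1) i (by omega) (by omega) h4 hp

theorem pvGC_two_of (ws p : List String) :
    ∀ d pos i j, i - pos ≤ d → pos ≤ i → i + 4 ≤ j → j + 4 ≤ ws.length →
      pvPhrase ws i = p → pvPhrase ws j = p → 2 ≤ pvGC ws p pos := by
  intro d
  induction d with
  | zero =>
    intro pos i j hd hpi hij h4 hp hq
    have : pos = i := by omega
    subst this
    rw [pvGC]
    simp only [show pos + 4 ≤ ws.length by omega, if_true, hp]
    have := pvGC_one_of ws p (j - (pos + 4)) (pos + 4) j (by omega) (by omega) h4 hq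
    omega
  | succ d ih =>
    intro pos i j hd hpi hij h4 hp hq
    rw [pvGC]
    have hl : pos + 4 ≤ ws.length := by omega
    by_cases hm : pvPhrase ws pos = p
    · simp only [hl, if_true, hm]
      have := pvGC_one_of ws p (j - (pos + 4)) (pos + 4) j (by omega) (by omega) h4 hq
      omega
    · have hne : pos ≠ i := fun h => hm (h ▸ hp)
      simp only [hl, if_true, hm, if_false]
      exact ih (pos + 1) i j (by omega) (by omega) hij h4 hp hq

theorem pvGC_three_of (ws p : List String) :
    ∀ d pos i j k, i - pos ≤ d → pos ≤ i → i + 4 ≤ j → j + 4 ≤ k → k + 4 ≤ ws.length →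
      pvPhrase ws i = p → pvPhrase ws j = p → pvPhrase ws k = p → 3 ≤ pvGC ws p pos := by
  intro d
  induction d with
  | zero =>
    intro pos i j k hd hpi hij hjk h4 hp hq hr
    have : pos = i := by omega
    subst this
    rw [pvGC]
    simp only [show pos + 4 ≤ ws.length by omega, if_true, hp]
    have := pvGC_two_of ws p (j - (pos + 4)) (pos + 4) j k (by omega) (by omega) hjk h4 hq hr
    omega
  | succ d ih =>
    intro pos i j k hd hpi hij hjk h4 hp hq hr
    rw [pvGC]
    have hl : pos + 4 ≤ ws.length := by omega
    by_cases hm : pvPhrase ws pos = p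
    · simp only [hl, if_true, hm]
      have := pvGC_two_of ws p (j - (pos + 4)) (pos + 4) j k (by omega) (by omega) hjk h4 hq hr
      omega
    · have hne : pos ≠ i := fun h => hm (h ▸ hp)
      simp only [hl, if_true, hm, if_false]
      exact ih (pos + 1) i j k (by omega) (by omega) hij hjk h4 hp hq hr

-- B's state pvGS tracks the prefix of A's greedy count: gc from 0 = count so far + gc from the frontier
theorem pvGS_gc (ws p : List String) (i : Nat) :
    pvGC ws p 0 = (pvGS ws p i).1 + pvGC ws p (max (pvGS ws p i).2 i) := by
  induction i with
  | zero => simp [pvGS]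
  | succ i ih =>
    by_cases hc : i + 4 ≤ ws.length ∧ pvPhrase ws i = p ∧ (pvGS ws p i).2 ≤ i
    · obtain ⟨h4, hm, hnx⟩ := hc
      rw [show pvGS ws p (i + 1) = ((pvGS ws p i).1 + 1, i + 4) by
            rw [pvGS]; simp [h4, hm, hnx]]
      have hmax : max (pvGS ws p i).2 i = i := by omega
      have hmax2 : max (i + 4) (i + 1) = i + 4 := by omega
      rw [ih, hmax]
      simp only [hmax2]
      rw [pvGC]
      simp [h4, hm]
      omega
    · rw [show pvGS ws p (i + 1) = pvGS ws p i by rw [pvGS]; simp [hc]]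
      rw [ih]
      by_cases hnx : (pvGS ws p i).2 ≤ i
      · have hmax : max (pvGS ws p i).2 i = i := by omega
        have hmax2 : max (pvGS ws p i).2 (i + 1) = i + 1 := by omega
        rw [hmax, hmax2]
        by_cases h4 : i + 4 ≤ ws.length
        · have hm : pvPhrase ws i ≠ p := fun h => hc ⟨h4, h, hnx⟩
          rw [pvGC]; simp [h4, hm]
        · have h5 : ¬ (i + 1 + 4 ≤ ws.length) := by omega
          rw [pvGC, if_neg h4, pvGC, if_neg h5]
      · have : max (pvGS ws p i).2 i = (pvGS ws p i).2 := by omega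
        have h2 : max (pvGS ws p i).2 (i + 1) = (pvGS ws p i).2 := by omega
        rw [this, h2]

-- the count only reaches 3 by passing through a position where it is 2 and a match fires
theorem pvGS_cross (ws p : List String) :
    ∀ i, 3 ≤ (pvGS ws p i).1 →
      ∃ j, j + 4 ≤ ws.length ∧ pvPhrase ws j = p ∧ (pvGS ws p j).2 ≤ j ∧ 2 ≤ (pvGS ws p j).1 := by
  intro i
  induction i with
  | zero => intro h; simp [pvGS] at h
  | succ i ih =>
    intro h
    by_cases hc : i + 4 ≤ ws.length ∧ pvPhrase ws i = p ∧ (pvGS ws p i).2 ≤ i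
    · rw [show pvGS ws p (i + 1) = ((pvGS ws p i).1 + 1, i + 4) by
            rw [pvGS]; simp [hc.1, hc.2.1, hc.2.2]] at h
      by_cases h3 : 3 ≤ (pvGS ws p i).1
      · exact ih h3
      · exact ⟨i, hc.1, hc.2.1, hc.2.2, by omega⟩
    · rw [show pvGS ws p (i + 1) = pvGS ws p i by rw [pvGS]; simp [hc]] at h
      exact ih h

-- characterization of A's outer loop
theorem pvOuterA_iff (ws : List String) (start : Nat) :
    pvOuterA ws start = true ↔
      ∃ s, start ≤ s ∧ s + 4 ≤ ws.length ∧ 3 ≤ pvGC ws (pvPhrase ws s) s := by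
  fun_induction pvOuterA ws start with
  | case1 start hl h3 =>
    rw [pvInnerA_eq_gc] at h3
    constructor
    · intro _; exact ⟨start, le_refl _, hl, by omega⟩
    · intro _; rfl
  | case2 start hl h3 ih =>
    rw [pvInnerA_eq_gc] at h3
    rw [ih]
    constructor
    · rintro ⟨s, hs, h4, hgc⟩; exact ⟨s, by omega, h4, hgc⟩
    · rintro ⟨s, hs, h4, hgc⟩
      refine ⟨s, ?_, h4, hgc⟩
      rcases Nat.eq_or_lt_of_le hs with h | h
      · exfalso; subst h; omega
      · omega
  | case3 start hl =>
    simp only [Bool.false_eq_true, false_iff]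
    rintro ⟨s, hs, h4, _⟩
    omega

-- characterization of B's loop, given that the dicts hold exactly the greedy state at i
theorem pvLoopB_iff (ws : List String) :
    ∀ fuel i counts nextFree, ws.length ≤ i + fuel →
    (∀ p, counts.getD p 0 = (pvGS ws p i).1) →
    (∀ p, nextFree.getD p 0 = (pvGS ws p i).2) →
    (pvLoopB ws counts nextFree i = true ↔
      ∃ j, i ≤ j ∧ j + 4 ≤ ws.length ∧ (pvGS ws (pvPhrase ws j) j).2 ≤ j ∧
        2 ≤ (pvGS ws (pvPhrase ws j) j).1) := by
  intro fuel
  induction fuel with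
  | zero =>
    intro i counts nextFree hf hC hN
    rw [pvLoopB]
    have hl : ¬ (i + 4 ≤ ws.length) := by omega
    simp only [hl, if_false, Bool.false_eq_true, false_iff]
    rintro ⟨j, hj, h4, _⟩
    omega
  | succ fuel ih =>
    intro i counts nextFree hf hC hN
    rw [pvLoopB]
    by_cases hl : i + 4 ≤ ws.length
    · simp only [hl, if_true]
      by_cases hnx : nextFree.getD (pvPhrase ws i) 0 ≤ i
      · simp only [hnx, if_true]
        by_cases h3 : 3 ≤ counts.getD (pvPhrase ws i) 0 + 1
        · simp only [h3, if_true]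
          rw [hN] at hnx
          rw [hC] at h3
          constructor
          · intro _; exact ⟨i, le_refl _, hl, hnx, by omega⟩
          · intro _; trivial
        · simp only [h3, if_false]
          have hnx' := hnx; rw [hN] at hnx'
          have hstep : ∀ q, pvGS ws q (i + 1) =
              if q = pvPhrase ws i then ((pvGS ws q i).1 + 1, i + 4) else pvGS ws q i := by
            intro q
            by_cases hq : q = pvPhrase ws i
            · subst hq; rw [pvGS]; simp [hl, hnx']
            · rw [pvGS]
              have : ¬ (pvPhrase ws i = q) := fun h => hq h.symm
              simp [this, hq]
          rw [ih (i + 1) _ _ (by omega) ?_ ?_]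
          · constructor
            · rintro ⟨j, hj, h4, hn, h2⟩; exact ⟨j, by omega, h4, hn, h2⟩
            · rintro ⟨j, hj, h4, hn, h2⟩
              refine ⟨j, ?_, h4, hn, h2⟩
              rcases Nat.eq_or_lt_of_le hj with h | h
              · exfalso
                rw [← h] at h2
                rw [hC] at h3
                omega
              · omega
          · intro q
            rw [hstep q, PySem.Dict.getD_insert]
            by_cases hq : q = pvPhrase ws i
            · simp [hq, hC]
            · simp [hq, hC]
          · intro q
            rw [hstep q, PySem.Dict.getD_insert]
            by_cases hq : q = pvPhrase ws i
            · simp [hq]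
            · simp [hq, hN]
      · simp only [hnx, if_false]
        have hnx' := hnx; rw [hN] at hnx'
        have hstep : ∀ q, pvGS ws q (i + 1) = pvGS ws q i := by
          intro q
          rw [pvGS]
          by_cases hq : pvPhrase ws i = q
          · subst hq; simp; omega
          · simp [hq]
        rw [ih (i + 1) _ _ (by omega) (fun q => by rw [hstep q]; exact hC q)
              (fun q => by rw [hstep q]; exact hN q)]
        constructor
        · rintro ⟨j, hj, h4, hn, h2⟩; exact ⟨j, by omega, h4, hn, h2⟩
        · rintro ⟨j, hj, h4, hn, h2⟩
          refine ⟨j, ?_, h4, hn, h2⟩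
          rcases Nat.eq_or_lt_of_le hj with h | h
          · exfalso; rw [← h] at hn; exact hnx' hn
          · omega
    · simp only [hl, if_false, Bool.false_eq_true, false_iff]
      rintro ⟨j, hj, h4, _⟩
      omega

-- bridge: A's existential ↔ some phrase has greedy count ≥ 3 from 0 ↔ B's existential
theorem pv_bridge (ws : List String) :
    (∃ s, s + 4 ≤ ws.length ∧ 3 ≤ pvGC ws (pvPhrase ws s) s) ↔
    (∃ j, j + 4 ≤ ws.length ∧ (pvGS ws (pvPhrase ws j) j).2 ≤ j ∧
      2 ≤ (pvGS ws (pvPhrase ws j) j).1) := by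
  constructor
  · rintro ⟨s, h4, hgc⟩
    obtain ⟨i, j, k, hsi, hij, hjk, hk4, hp, hq, hr⟩ := pvGC_three_to ws _ s hgc
    set p := pvPhrase ws s with hpdef
    have h0 : 3 ≤ pvGC ws p 0 :=
      pvGC_three_of ws p i 0 i j k (by omega) (by omega) hij hjk hk4 hp hq hr
    have hW := pvGS_gc ws p ws.length
    have hzero : pvGC ws p (max (pvGS ws p ws.length).2 ws.length) = 0 := by
      rw [pvGC]
      have : ¬ (max (pvGS ws p ws.length).2 ws.length + 4 ≤ ws.length) := by omega
      simp [this]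
    rw [hzero] at hW
    obtain ⟨j', hj4, hm, hn, h2⟩ := pvGS_cross ws p ws.length (by omega)
    exact ⟨j', hj4, by rw [hm]; exact hn, by rw [hm]; exact h2⟩
  · rintro ⟨j, h4, hn, h2⟩
    set p := pvPhrase ws j with hpdef
    have hW := pvGS_gc ws p j
    have hmax : max (pvGS ws p j).2 j = j := by omega
    rw [hmax] at hW
    have hone : 1 ≤ pvGC ws p j := by
      rw [pvGC]; simp [h4, hpdef]
    have h3 : 3 ≤ pvGC ws p 0 := by omega
    obtain ⟨i, j', k, _, hij, hjk, hk4, hp, hq, hr⟩ := pvGC_three_to ws p 0 h3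
    refine ⟨i, by omega, ?_⟩
    rw [hp]
    exact pvGC_three_of ws p i i i j' k (by omega) (le_refl _) hij hjk hk4 hp hq hr
  -- (the backward direction lands in A's existential shape below)

theorem pv_main (ws : List String) :
    pvOuterA ws 0 = pvLoopB ws PySem.Dict.empty PySem.Dict.empty 0 := by
  rw [Bool.eq_iff_iff]
  rw [pvOuterA_iff, pvLoopB_iff ws ws.length 0 PySem.Dict.empty PySem.Dict.empty (by omega)
        (fun p => by simp [pvGS, PySem.Dict.getD_empty])
        (fun p => by simp [pvGS, PySem.Dict.getD_empty])]
  constructor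
  · rintro ⟨s, _, h4, hgc⟩
    obtain ⟨j, hj4, hn, h2⟩ := (pv_bridge ws).mp ⟨s, h4, hgc⟩
    exact ⟨j, by omega, hj4, hn, h2⟩
  · rintro ⟨j, _, hj4, hn, h2⟩
    obtain ⟨s, h4, hgc⟩ := (pv_bridge ws).mpr ⟨j, hj4, hn, h2⟩
    exact ⟨s, by omega, h4, hgc⟩

-- ===== VERDICT (by name: the statement is the Claim_ definition above) =====
theorem has_repetition_spec : Claim_equal_has_repetition := by
  intro text _
  unfold Spec_has_repetition has_repetition has_repetition_alt
  by_cases h : (PySem.Str.split₀ (PySem.Str.lower text)).length < 4 * 3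
  · simp [h]
  · simp only [h, if_false]
    exact pv_main _
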